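-- pv_equiv track=rewrite | github.com/IBMSPadmin/spadmin | completer-poc/spadmin.py | old_regexpgenerator
-- ===== SOURCE A (Python) =====
-- def old_regexpgenerator( regexp ):
--     # Generate regular expressions pattern
--
--     tmpstring = regexp
--
--     for x in regexp:
--       if tmpstring[ -1 ].isupper():
--         break
--
--       tmpstring = regexp[ 0 : len( tmpstring ) - 1 ]
--       regexp += '|' + tmpstring
--
--     return '(' + regexp + ')'
-- ===== SOURCE B (Python) =====
-- def old_regexpgenerator(regexp):
--     # Locate the rightmost uppercase character, then emit the alternation directly.
--     n = len(regexp)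
--     stop = n - 1
--     while stop >= 0 and not regexp[stop].isupper():
--         stop -= 1
--     return '(' + '|'.join([regexp] + [regexp[:j] for j in range(n - 1, stop, -1)]) + ')'
-- ===== Notes on version B (the rewrite author's own statement) =====
-- stated objective: simpler
-- what changed: Replaces A's forward loop that mutates a shrinking tmpstring while concatenating onto the growing regexp with two separate phases: first locate the rightmost uppercase index by a backward scan, then emit the alternation in one join over the prefix lengths.
import Mathlib
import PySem

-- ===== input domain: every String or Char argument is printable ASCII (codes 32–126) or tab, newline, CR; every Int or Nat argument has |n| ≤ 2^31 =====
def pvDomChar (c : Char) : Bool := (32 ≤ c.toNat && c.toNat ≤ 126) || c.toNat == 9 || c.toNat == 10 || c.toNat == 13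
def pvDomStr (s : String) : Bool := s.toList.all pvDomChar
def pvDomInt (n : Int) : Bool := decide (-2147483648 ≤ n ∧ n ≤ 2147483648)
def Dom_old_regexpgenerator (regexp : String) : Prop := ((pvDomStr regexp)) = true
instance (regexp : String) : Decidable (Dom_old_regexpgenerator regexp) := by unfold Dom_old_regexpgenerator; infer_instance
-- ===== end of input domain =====

-- B replaces A's single mutating loop by two phases (find the rightmost uppercase index, then
-- join the prefixes); objective: simpler decomposition, same cost.

-- ===== PORT A =====
-- the for-loop: iterates over the ORIGINAL string's characters (rem); state = (tmpstring, regexp)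
def pvLoopA : List Char → List Char → List Char → List Char
  | [], _tmp, reg => reg
  | _ :: rest, tmp, reg =>
    match PySem.List.pyGet? tmp (-1) with
    | none => reg       -- Python would raise IndexError here; unreachable (tmp is nonempty at every check)
    | some c =>
      if PySem.Str.isupper c then reg   -- break
      else
        let tmp' := PySem.List.slice reg (some 0) (some (PySem.List.len tmp - 1))  -- regexp[0:len(tmpstring)-1]
        pvLoopA rest tmp' (reg ++ '|' :: tmp')                                     -- regexp += '|' + tmpstring

def old_regexpgenerator (regexp : String) : String :=
  String.ofList ('(' :: pvLoopA regexp.toList regexp.toList regexp.toList ++ [')'])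

-- ===== PORT B =====
-- the backward while-loop: stop starts at n-1 and moves left while regexp[stop] is not uppercase
def pvStopB (l : List Char) : Nat → Int
  | 0 => -1
  | k + 1 => if PySem.Str.isupper (l.getD k ' ') then (k : Int) else pvStopB l k

def old_regexpgenerator_alt (regexp : String) : String :=
  String.ofList ('(' ::
    List.intercalate ['|']                                                 -- '|'.join(parts)
      (regexp.toList ::
        (PySem.List.pyRange ((regexp.toList.length : Int) - 1) (pvStopB regexp.toList regexp.toList.length) (-1)).map
          (fun j => PySem.List.slice regexp.toList none (some j)))         -- regexp[:j] for j in range(n-1, stop, -1)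
    ++ [')'])

-- ===== PRECONDITION & SPEC =====
def Spec_old_regexpgenerator (regexp : String) (out : String) : Prop := out = old_regexpgenerator_alt regexp
instance (regexp : String) (out : String) : Decidable (Spec_old_regexpgenerator regexp out) := by unfold Spec_old_regexpgenerator; infer_instance

-- ===== CLAIM (what is proved, stated in full; the proofs are below) =====
def Claim_equal_old_regexpgenerator : Prop := ∀ (regexp : String), Dom_old_regexpgenerator regexp → Spec_old_regexpgenerator regexp (old_regexpgenerator regexp)

-- ===== LEMMAS AND PROOFS =====

-- B's stopping index is always below k
lemma pvStopB_lt (l : List Char) (k : Nat) : pvStopB l k < (k : Int) := by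
  induction k with
  | zero => simp [pvStopB]
  | succ k ih =>
    simp only [pvStopB]
    split
    · push_cast; omega
    · push_cast; omega

-- '|'.join as a flatMap after the first part
lemma intercalate_bar (x : List Char) (xs : List (List Char)) :
    List.intercalate ['|'] (x :: xs) = x ++ xs.flatMap (fun p => '|' :: p) := by
  induction xs generalizing x with
  | nil => simp [List.intercalate]
  | cons y ys ih =>
    simp [List.intercalate] at ih ⊢
    simp [ih]

-- the core invariant: with tmp = l.take k and l a prefix of reg, A's loop appends exactly
-- the prefixes l.take j for j from k-1 down to pvStopB l k + 1
lemma pvLoopA_eq (l : List Char) (k : Nat) : ∀ (rem tmp reg : List Char),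
    rem.length = k → k ≤ l.length → tmp = l.take k → l <+: reg →
    pvLoopA rem tmp reg
      = reg ++ (PySem.List.pyRange ((k : Int) - 1) (pvStopB l k) (-1)).flatMap
          (fun j => '|' :: PySem.List.slice l none (some j)) := by
  induction k with
  | zero =>
    intro rem tmp reg hlen _ _ _
    have : rem = [] := List.eq_nil_of_length_eq_zero hlen
    subst this
    rw [PySem.List.pyRange_neg_one_eq_nil (by simp [pvStopB])]
    simp [pvLoopA]
  | succ k ih =>
    intro rem tmp reg hlen hk htmp hpre
    obtain ⟨r, rest, rfl⟩ : ∃ r rest, rem = r :: rest := by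
      cases rem with
      | nil => simp at hlen
      | cons a as => exact ⟨a, as, rfl⟩
    have hrest : rest.length = k := by simpa using hlen
    have htl : tmp.length = k + 1 := by
      subst htmp; simp [List.length_take]; omega
    have hget : PySem.List.pyGet? tmp (-1) = some tmp[k] := by
      have h1 := PySem.List.pyGet?_neg_natCast tmp 1 (by norm_num) (by omega)
      rw [show (-1 : Int) = -((1 : Nat) : Int) by norm_num, h1]
      simp [htl]
    have htk : tmp[k]'(by omega) = l[k]'(by omega) := by
      subst htmp; simp [List.getElem_take]
    simp only [pvLoopA, hget]
    have hgd : l.getD k ' ' = l[k]'(by omega) := List.getD_eq_getElem l ' ' (by omega)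
    have hunf : pvStopB l (k + 1)
        = if PySem.Str.isupper (l.getD k ' ') then (k : Int) else pvStopB l k := rfl
    by_cases hup : PySem.Str.isupper (l[k]'(by omega))
    · -- break: the emitted range is empty
      rw [if_pos (by rw [htk]; exact hup)]
      rw [hunf, hgd, if_pos hup,
        PySem.List.pyRange_neg_one_eq_nil (by push_cast; omega)]
      simp
    · rw [if_neg (by rw [htk]; exact hup)]
      have hstop : pvStopB l (k + 1) = pvStopB l k := by
        rw [hunf, hgd, if_neg hup]
      -- the new tmpstring is l.take k
      obtain ⟨t, rfl⟩ := hpre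
      have hslice : PySem.List.slice (l ++ t) (some 0) (some (PySem.List.len tmp - 1))
          = l.take k := by
        rw [show PySem.List.len tmp - 1 = ((k : Nat) : Int) by
          simp [PySem.List.len_eq, htl]]
        rw [PySem.List.slice_zero_start, PySem.List.slice_to_natCast]
        rw [List.take_append]
        simp [show k - l.length = 0 by omega]
      rw [hslice]
      have hpre' : l <+: (l ++ t) ++ '|' :: l.take k := ⟨t ++ '|' :: l.take k, by simp⟩
      rw [ih rest (l.take k) _ hrest (by omega) rfl hpre']
      rw [hstop, show ((k + 1 : Nat) : Int) - 1 = (k : Int) by push_cast; omega,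
        PySem.List.pyRange_neg_one_cons (pvStopB_lt l k)]
      simp [PySem.List.slice_to_natCast]

-- ===== VERDICT (by name: the statement is the Claim_ definition above) =====
theorem old_regexpgenerator_spec : Claim_equal_old_regexpgenerator := by
  intro regexp _
  unfold Spec_old_regexpgenerator old_regexpgenerator old_regexpgenerator_alt
  rw [pvLoopA_eq regexp.toList regexp.toList.length regexp.toList regexp.toList regexp.toList
      rfl le_rfl (by simp) (List.prefix_refl _),
    intercalate_bar, List.flatMap_map]
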